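-- pv_equiv track=rewrite | github.com/nthpyrodev/kyuncli | kyuncli/config.py | hours_before_thresholds
-- ===== SOURCE A (Python) =====
-- def hours_before_thresholds(hours: list | tuple | None) -> list[int]:
--     default = [72]
--     if hours is None:
--         return default
--     if not isinstance(hours, (list, tuple)) or len(hours) == 0:
--         return default
--     out = sorted({h for h in hours if isinstance(h, int) and not isinstance(h, bool) and h > 0})
--     return out or default
-- ===== SOURCE B (Python) =====
-- def hours_before_thresholds(hours: list | tuple | None) -> list[int]:
--     if hours is None or not isinstance(hours, (list, tuple)) or len(hours) == 0:
--         return [72]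
--     out = []
--     for h in hours:
--         if isinstance(h, int) and not isinstance(h, bool) and h > 0:
--             i = 0
--             while i < len(out) and out[i] < h:
--                 i += 1
--             if i == len(out) or out[i] != h:
--                 out.insert(i, h)
--     return out if out else [72]
-- ===== Notes on version B (the rewrite author's own statement) =====
-- stated objective: alternative
-- what changed: B replaces A's set comprehension followed by a library sort with a single pass that inserts each qualifying value into its sorted position in the growing output and skips values already present (online insertion sort with inline dedup); no set and no sort call.
import Mathlib
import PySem

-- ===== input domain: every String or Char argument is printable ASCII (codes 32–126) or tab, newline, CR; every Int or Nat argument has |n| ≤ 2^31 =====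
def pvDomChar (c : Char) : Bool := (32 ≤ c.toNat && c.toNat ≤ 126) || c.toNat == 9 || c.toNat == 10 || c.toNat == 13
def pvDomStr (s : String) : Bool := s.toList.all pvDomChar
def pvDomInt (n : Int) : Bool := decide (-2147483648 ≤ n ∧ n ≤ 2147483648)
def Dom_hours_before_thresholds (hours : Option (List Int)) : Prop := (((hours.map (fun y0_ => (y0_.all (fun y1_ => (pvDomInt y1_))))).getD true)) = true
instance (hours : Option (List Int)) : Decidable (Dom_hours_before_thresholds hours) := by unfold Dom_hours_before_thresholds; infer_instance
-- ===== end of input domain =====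

-- B replaces A's set comprehension + library sort by one pass inserting each qualifying value
-- into its sorted position in the output, skipping values already present (alternative decomposition, same result).


-- ===== PORT A =====
-- sorted({h for h in hours if isinstance(h, int) and … and h > 0}); the isinstance/bool checks are vacuous for List Int
def hours_before_thresholds (hours : Option (List Int)) : List Int :=
  let default := [72]
  match hours with
  | none => default
  | some xs =>
    if xs.length = 0 then default
    else
      let out := PySem.List.sorted (PySem.Set.ofList (xs.filter (fun h => 0 < h))) (fun x => x) false
      if out = [] then default else out

-- ===== PORT B =====
-- the inner `while i < len(out) and out[i] < h … if i == len(out) or out[i] != h: out.insert(i, h)`: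
-- scan past elements < h, then insert h unless it is already there (structural recursion over `out`)
def pvInsUniq (h : Int) : List Int → List Int
  | [] => [h]
  | x :: t => if x < h then x :: pvInsUniq h t else if x = h then x :: t else h :: x :: t

-- guards merged as in Source B; the for-loop over `hours` is a foldl carrying `out`
def hours_before_thresholds_alt (hours : Option (List Int)) : List Int :=
  match hours with
  | none => [72]
  | some xs =>
    if xs.length = 0 then [72]
    else
      let out := xs.foldl (fun acc h => if 0 < h then pvInsUniq h acc else acc) []
      if out = [] then [72] else out

-- ===== PRECONDITION & SPEC =====
def Spec_hours_before_thresholds (hours : Option (List Int)) (out : List Int) : Prop := out = hours_before_thresholds_alt hours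
instance (hours : Option (List Int)) (out : List Int) : Decidable (Spec_hours_before_thresholds hours out) := by unfold Spec_hours_before_thresholds; infer_instance

-- ===== CLAIM (what is proved, stated in full; the proofs are below) =====
def Claim_equal_hours_before_thresholds : Prop := ∀ (hours : Option (List Int)), Dom_hours_before_thresholds hours → Spec_hours_before_thresholds hours (hours_before_thresholds hours)

-- ===== LEMMAS AND PROOFS =====

-- inserting into a strictly sorted list keeps it strictly sorted and adds exactly h to its members
lemma pvInsUniq_spec (h : Int) (l : List Int) (hl : l.Pairwise (· < ·)) :
    (pvInsUniq h l).Pairwise (· < ·) ∧ (∀ y, y ∈ pvInsUniq h l ↔ y = h ∨ y ∈ l) := by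
  induction l with
  | nil => simp [pvInsUniq]
  | cons x t ih =>
    rw [List.pairwise_cons] at hl
    obtain ⟨hxt, hst⟩ := hl
    obtain ⟨ih1, ih2⟩ := ih hst
    by_cases hlt : x < h
    · simp only [pvInsUniq, hlt, if_true]
      constructor
      · rw [List.pairwise_cons]
        refine ⟨fun y hy => ?_, ih1⟩
        rcases (ih2 y).mp hy with rfl | hy
        · exact hlt
        · exact hxt y hy
      · intro y; rw [List.mem_cons, ih2 y, List.mem_cons]; tauto
    · by_cases heq : x = h
      · subst heq
        simp only [pvInsUniq, lt_irrefl, if_false]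
        refine ⟨List.pairwise_cons.mpr ⟨hxt, hst⟩, fun y => ?_⟩
        simp [List.mem_cons]
      · simp only [pvInsUniq, hlt, if_false, heq, if_false]
        constructor
        · rw [List.pairwise_cons]
          refine ⟨fun y hy => ?_, List.pairwise_cons.mpr ⟨hxt, hst⟩⟩
          rcases List.mem_cons.mp hy with rfl | hy
          · omega
          · have := hxt y hy; omega
        · intro y; simp [List.mem_cons]

-- the fold keeps the accumulator strictly sorted; its members are the accumulator's plus the positives seen
lemma pvFold_spec (xs : List Int) (acc : List Int) (hacc : acc.Pairwise (· < ·)) :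
    (xs.foldl (fun acc h => if 0 < h then pvInsUniq h acc else acc) acc).Pairwise (· < ·) ∧
    (∀ y, y ∈ xs.foldl (fun acc h => if 0 < h then pvInsUniq h acc else acc) acc ↔
          y ∈ acc ∨ (y ∈ xs ∧ 0 < y)) := by
  induction xs generalizing acc with
  | nil => simp [hacc]
  | cons h t ih =>
    simp only [List.foldl_cons]
    by_cases hp : 0 < h
    · simp only [hp, if_true]
      obtain ⟨i1, i2⟩ := pvInsUniq_spec h acc hacc
      obtain ⟨j1, j2⟩ := ih (pvInsUniq h acc) i1
      refine ⟨j1, fun y => ?_⟩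
      rw [j2 y, i2 y, List.mem_cons]
      constructor
      · rintro ((rfl | hy) | ⟨hy, hpy⟩)
        · exact Or.inr ⟨Or.inl rfl, hp⟩
        · exact Or.inl hy
        · exact Or.inr ⟨Or.inr hy, hpy⟩
      · rintro (hy | ⟨(rfl | hy), hpy⟩)
        · exact Or.inl (Or.inr hy)
        · exact Or.inl (Or.inl rfl)
        · exact Or.inr ⟨hy, hpy⟩
    · simp only [hp, if_false]
      obtain ⟨j1, j2⟩ := ih acc hacc
      refine ⟨j1, fun y => ?_⟩
      rw [j2 y, List.mem_cons]
      constructor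
      · rintro (hy | ⟨hy, hpy⟩)
        · exact Or.inl hy
        · exact Or.inr ⟨Or.inr hy, hpy⟩
      · rintro (hy | ⟨(rfl | hy), hpy⟩)
        · exact Or.inl hy
        · exact absurd hpy hp
        · exact Or.inr ⟨hy, hpy⟩

-- B's insertion fold IS A's sort of the set of positives
lemma fold_eq_sorted_set (xs : List Int) :
    PySem.List.sorted (PySem.Set.ofList (xs.filter (fun h => 0 < h))) (fun x => x) false
      = xs.foldl (fun acc h => if 0 < h then pvInsUniq h acc else acc) [] := by
  obtain ⟨h1, h2⟩ := pvFold_spec xs [] (by simp)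
  apply PySem.List.sorted_eq_of_perm_of_pairwise_lt
  · apply (List.perm_ext_iff_of_nodup (h1.imp Int.ne_of_lt)
      (PySem.Set.nodup_ofList _)).mpr
    intro y
    rw [h2 y, PySem.Set.mem_ofList, List.mem_filter]
    simp
  · exact h1

-- ===== VERDICT (by name: the statement is the Claim_ definition above) =====
theorem hours_before_thresholds_spec : Claim_equal_hours_before_thresholds := by
  intro hours _
  unfold Spec_hours_before_thresholds hours_before_thresholds hours_before_thresholds_alt
  cases hours with
  | none => rfl
  | some xs =>
    simp only
    split
    · rfl
    · rw [fold_eq_sorted_set]
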